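-- pv_equiv track=rewrite | github.com/Real-Fruit-Snacks/Seep | server/agent/composer.py | _obfuscate_strings
-- ===== SOURCE A (Python) =====
-- def _obfuscate_strings(content: str) -> str:
--     """Basic string obfuscation - split sensitive tool names using concatenation."""
--     sensitive = {
--         "mimikatz": '"mimi" + "katz"',
--         "Mimikatz": '"Mimi" + "katz"',
--         "SharpHound": '"Sharp" + "Hound"',
--         "Rubeus": '"Rub" + "eus"',
--         "GodPotato": '"God" + "Potato"',
--         "PrintSpoofer": '"Print" + "Spoofer"',
--         "JuicyPotato": '"Juicy" + "Potato"',
--         "SweetPotato": '"Sweet" + "Potato"',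
--         "BloodHound": '"Blood" + "Hound"',
--         "LaZagne": '"LaZ" + "agne"',
--         "Certify": '"Cert" + "ify"',
--         "Seatbelt": '"Seat" + "belt"',
--         "accesschk": '"access" + "chk"',
--     }
--     for plain, obf in sensitive.items():
--         # Only replace when the string appears inside PS string literals
--         # (i.e., surrounded by quotes) to avoid breaking function/variable names
--         content = content.replace(f'"{plain}"', obf)
--         content = content.replace(f"'{plain}'", obf)
--     return content
-- ===== SOURCE B (Python) =====
-- def _obfuscate_strings(content: str) -> str:
--     """Single left-to-right scan: at each position emit either the obfuscated
--     form of a quoted sensitive name or the character unchanged."""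
--     sensitive = {
--         "mimikatz": '"mimi" + "katz"',
--         "Mimikatz": '"Mimi" + "katz"',
--         "SharpHound": '"Sharp" + "Hound"',
--         "Rubeus": '"Rub" + "eus"',
--         "GodPotato": '"God" + "Potato"',
--         "PrintSpoofer": '"Print" + "Spoofer"',
--         "JuicyPotato": '"Juicy" + "Potato"',
--         "SweetPotato": '"Sweet" + "Potato"',
--         "BloodHound": '"Blood" + "Hound"',
--         "LaZagne": '"LaZ" + "agne"',
--         "Certify": '"Cert" + "ify"',
--         "Seatbelt": '"Seat" + "belt"',
--         "accesschk": '"access" + "chk"',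
--     }
--     table = []
--     for plain, obf in sensitive.items():
--         table.append(('"' + plain + '"', obf))
--         table.append(("'" + plain + "'", obf))
--     out = []
--     i = 0
--     n = len(content)
--     while i < n:
--         for pat, obf in table:
--             if content.startswith(pat, i):
--                 out.append(obf)
--                 i += len(pat)
--                 break
--         else:
--             out.append(content[i])
--             i += 1
--     return "".join(out)
-- ===== Notes on version B (the rewrite author's own statement) =====
-- stated objective: alternative
-- what changed: Replaces A's 26 sequential full-string str.replace passes (one per quoted form of each sensitive name) by a single left-to-right scan over the input that, at each position, looks up the quoted-pattern table and emits either the obfuscated replacement or the character unchanged.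
import Mathlib
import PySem

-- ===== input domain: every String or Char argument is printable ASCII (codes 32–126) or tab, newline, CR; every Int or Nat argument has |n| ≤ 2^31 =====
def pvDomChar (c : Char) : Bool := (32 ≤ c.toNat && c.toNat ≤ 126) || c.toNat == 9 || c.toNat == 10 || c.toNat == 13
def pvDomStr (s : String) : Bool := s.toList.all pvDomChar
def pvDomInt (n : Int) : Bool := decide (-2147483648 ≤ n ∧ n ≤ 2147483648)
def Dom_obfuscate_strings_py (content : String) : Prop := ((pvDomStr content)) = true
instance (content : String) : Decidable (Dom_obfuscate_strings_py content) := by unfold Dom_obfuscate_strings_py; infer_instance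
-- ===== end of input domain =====

-- B replaces A's 26 sequential full-string `str.replace` passes by ONE left-to-right scan
-- that rewrites each quoted sensitive name where it stands (objective: alternative, one pass
-- instead of 26; equal on Pre_, which excludes inputs where the passes can interact).

-- ===== PORT A =====

-- the dict of A (insertion order), shared by both ports' transliterations
def pvKeys : List (String × String) := [
  ("mimikatz",     "\"mimi\" + \"katz\""),
  ("Mimikatz",     "\"Mimi\" + \"katz\""),
  ("SharpHound",   "\"Sharp\" + \"Hound\""),
  ("Rubeus",       "\"Rub\" + \"eus\""),
  ("GodPotato",    "\"God\" + \"Potato\""),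
  ("PrintSpoofer", "\"Print\" + \"Spoofer\""),
  ("JuicyPotato",  "\"Juicy\" + \"Potato\""),
  ("SweetPotato",  "\"Sweet\" + \"Potato\""),
  ("BloodHound",   "\"Blood\" + \"Hound\""),
  ("LaZagne",      "\"LaZ\" + \"agne\""),
  ("Certify",      "\"Cert\" + \"ify\""),
  ("Seatbelt",     "\"Seat\" + \"belt\""),
  ("accesschk",    "\"access\" + \"chk\"")]

-- A: for each key, replace the double-quoted then the single-quoted form, 26 passes in all
def obfuscate_strings_py (content : String) : String :=
  pvKeys.foldl (fun s kv =>
    let s1 := PySem.Str.replace s ("\"" ++ kv.1 ++ "\"") kv.2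
    PySem.Str.replace s1 ("'" ++ kv.1 ++ "'") kv.2) content

-- ===== PORT B =====

-- Source B: table of (quoted pattern, replacement), double- then single-quoted per key
def pvTableB : List (String × String) :=
  pvKeys.foldl (fun t kv =>
    t ++ [("\"" ++ kv.1 ++ "\"", kv.2), ("'" ++ kv.1 ++ "'", kv.2)]) []

-- Source B's inner `for pat, obf in table: if content.startswith(pat, i)` loop
def pvScanFind (tb : List (String × String)) (l : List Char) : Option (List Char × Nat) :=
  match tb with
  | [] => none
  | (p, r) :: rest =>
    if PySem.Chars.startswith l p.toList then some (r.toList, p.toList.length)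
    else pvScanFind rest l

-- Source B's outer `while i < n` loop; each step consumes at least one character, so
-- fuel = length of the remaining input suffices (the 0-fuel branch is never reached)
def pvScanGo (tb : List (String × String)) : Nat → List Char → List Char
  | _, [] => []
  | 0, l => l
  | fuel + 1, c :: t =>
    match pvScanFind tb (c :: t) with
    | some (r, k) => r ++ pvScanGo tb fuel ((c :: t).drop k)
    | none => c :: pvScanGo tb fuel t

def obfuscate_strings_py_alt (content : String) : String :=
  String.ofList (pvScanGo pvTableB content.toList.length content.toList)

-- ===== PRECONDITION & SPEC =====

def pvIsLet (c : Char) : Bool := ('a' ≤ c && c ≤ 'z') || ('A' ≤ c && c ≤ 'Z')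

-- the 26 (quoted pattern, replacement) pairs as character lists, in A's pass order
def pvPairs : List (List Char × List Char) :=
  pvKeys.flatMap (fun kv =>
    [(("\"" ++ kv.1 ++ "\"").toList, kv.2.toList),
     (("'" ++ kv.1 ++ "'").toList, kv.2.toList)])

-- Pre_ excludes inputs where a quoted sensitive-token occurrence touches an ASCII letter:
-- there an earlier pass's replacement output can abut adjacent text to form a new quoted
-- token that A's later passes rewrite again, a cascade A and B may resolve differently.
def Pre_obfuscate_strings_py (content : String) : Prop :=
  ∀ i < content.toList.length, ∀ p ∈ pvPairs,
    p.1.isPrefixOf (content.toList.drop i) →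
      (i = 0 ∨ pvIsLet ((content.toList[i-1]?).getD ' ') = false) ∧
      pvIsLet ((content.toList[i + p.1.length]?).getD ' ') = false

instance (content : String) : Decidable (Pre_obfuscate_strings_py content) := by
  unfold Pre_obfuscate_strings_py; infer_instance

def pvWitness_obfuscate_strings_py : String := "run 'mimikatz' on \"BloodHound\" data"

def Spec_obfuscate_strings_py (content : String) (out : String) : Prop :=
  out = obfuscate_strings_py_alt content
instance (content : String) (out : String) : Decidable (Spec_obfuscate_strings_py content out) := by
  unfold Spec_obfuscate_strings_py; infer_instance

-- ===== CLAIM (what is proved, stated in full; the proofs are below) =====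
def Claim_equal_obfuscate_strings_py : Prop := ∀ (content : String), Dom_obfuscate_strings_py content → Pre_obfuscate_strings_py content → Spec_obfuscate_strings_py content (obfuscate_strings_py content)

-- ===== LEMMAS AND PROOFS =====

-- ---- structural characterization of Python str.replace (nonempty pattern) ----

def pvRepl (q r : List Char) : List Char → List Char
  | [] => []
  | c :: t =>
    if q.isPrefixOf (c :: t) ∧ q ≠ [] then r ++ pvRepl q r ((c :: t).drop q.length)
    else c :: pvRepl q r t
termination_by l => l.length
decreasing_by
  · rename_i h
    have : 1 ≤ q.length := by
      cases q with
      | nil => exact absurd rfl h.2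
      | cons a b => simp
    have hle : q.length ≤ (c :: t).length := (List.isPrefixOf_iff_prefix.mp h.1).length_le
    simp at hle ⊢
    omega
  · simp

theorem pvGo_eq (q r : List Char) (hq : q ≠ []) :
    ∀ (fuel : Nat) (l acc : List Char), l.length ≤ fuel →
      PySem.Chars.replace.go q r fuel l acc = acc.reverse ++ pvRepl q r l := by
  intro fuel
  induction fuel with
  | zero =>
    intro l acc hl
    have : l = [] := List.length_eq_zero_iff.mp (Nat.le_zero.mp hl)
    subst this
    rw [PySem.Chars.replace.go.eq_def]
    simp [pvRepl]
  | succ f ih =>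
    intro l acc hl
    cases l with
    | nil =>
      rw [PySem.Chars.replace.go.eq_def]
      simp [pvRepl]
    | cons c t =>
      rw [PySem.Chars.replace.go.eq_def]
      simp only []
      by_cases hp : q.isPrefixOf (c :: t)
      · have hq1 : 1 ≤ q.length := by
          cases q with
          | nil => exact absurd rfl hq
          | cons a b => simp
        have hlen : ((c :: t).drop q.length).length ≤ f := by
          simp at hl ⊢
          omega
        rw [if_pos hp, ih _ _ hlen]
        rw [pvRepl]
        rw [if_pos ⟨hp, hq⟩]
        simp
      · have hlen : t.length ≤ f := by simp at hl; omega
        rw [if_neg hp, ih _ _ hlen]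
        rw [pvRepl]
        rw [if_neg (by simp [hp])]
        simp

theorem pvReplace_eq (q r l : List Char) (hq : q ≠ []) :
    PySem.Chars.replace l q r = pvRepl q r l := by
  rw [PySem.Chars.replace]
  rw [if_neg (by simpa using hq)]
  simpa using pvGo_eq q r hq l.length l [] le_rfl

-- ---- tokenizer (proof-side): B's scan as a token stream ----

inductive pvTok where
  | raw : Char → pvTok
  | hit : List Char → List Char → pvTok
deriving DecidableEq, Repr

def pvFindTok : List (List Char × List Char) → List Char → Option (List Char × List Char)
  | [], _ => none
  | (q, r) :: tl, l => if q.isPrefixOf l then some (q, r) else pvFindTok tl l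

theorem pvFindTok_mem {tb : List (List Char × List Char)} {l q r}
    (h : pvFindTok tb l = some (q, r)) : (q, r) ∈ tb ∧ q.isPrefixOf l := by
  induction tb with
  | nil => simp [pvFindTok] at h
  | cons p tl ih =>
    obtain ⟨q', r'⟩ := p
    simp only [pvFindTok] at h
    split at h
    · cases h; exact ⟨List.mem_cons_self, by assumption⟩
    · rcases ih h with ⟨h1, h2⟩; exact ⟨List.mem_cons_of_mem _ h1, h2⟩

theorem pvFindTok_none {tb : List (List Char × List Char)} {l}
    (h : pvFindTok tb l = none) : ∀ p ∈ tb, ¬ p.1.isPrefixOf l := by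
  induction tb with
  | nil => simp
  | cons p tl ih =>
    obtain ⟨q', r'⟩ := p
    simp only [pvFindTok] at h
    split at h
    · exact absurd h (by simp)
    · intro p hp
      rcases List.mem_cons.mp hp with h1 | h1
      · subst h1; simpa using (by assumption : ¬ (q'.isPrefixOf l = true))
      · exact ih h p h1

theorem pvPairs_ne : ∀ p ∈ pvPairs, p.1 ≠ [] := by decide

def pvTokenize : List Char → List pvTok
  | [] => []
  | c :: t =>
    match hf : pvFindTok pvPairs (c :: t) with
    | some (q, r) => .hit q r :: pvTokenize ((c :: t).drop q.length)
    | none => .raw c :: pvTokenize t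
termination_by l => l.length
decreasing_by
  · have hm := pvFindTok_mem hf
    have hne := pvPairs_ne _ hm.1
    have hle := (List.isPrefixOf_iff_prefix.mp hm.2).length_le
    have : 1 ≤ q.length := by
      cases q with
      | nil => exact absurd rfl hne
      | cons a b => simp
    simp at hle ⊢
    omega
  · simp

def pvRendN (n : Nat) : pvTok → List Char
  | .raw c => [c]
  | .hit q r => if (q, r) ∈ pvPairs.take n then r else q

def pvFlat (n : Nat) (ts : List pvTok) : List Char := ts.flatMap (pvRendN n)

theorem pvTokenize_reconstruct (l : List Char) : pvFlat 0 (pvTokenize l) = l := by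
  induction l using pvTokenize.induct with
  | case1 => simp [pvTokenize, pvFlat]
  | case2 c t q r hf ih =>
    rw [pvTokenize, hf]
    have hm := pvFindTok_mem hf
    have hpre := List.isPrefixOf_iff_prefix.mp hm.2
    simp only [pvFlat, List.flatMap_cons] at ih ⊢
    rw [ih]
    simp only [pvRendN, List.take_zero]
    rw [if_neg (by simp)]
    exact List.prefix_iff_eq_append.mp hpre
  | case3 c t hf ih =>
    rw [pvTokenize, hf]
    simp only [pvFlat, List.flatMap_cons] at ih ⊢
    rw [ih]
    simp [pvRendN]


-- ---- decidable facts about the concrete table ----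

theorem pvPairs_ne2 : ∀ p ∈ pvPairs, p.2 ≠ [] := by decide
theorem pvRHead : ∀ p ∈ pvPairs, p.2.head? = some '"' := by decide
theorem pvHeads : ∀ p ∈ pvPairs, pvIsLet ((p.1[0]?).getD ' ') = false ∧
    pvIsLet ((p.2[0]?).getD ' ') = false := by decide
theorem pvNodup : pvPairs.Nodup := by decide
theorem pvFstInj : ∀ p ∈ pvPairs, ∀ p' ∈ pvPairs, p.1 = p'.1 → p = p' := by decide
theorem pvQLen : ∀ p ∈ pvPairs, 4 ≤ p.1.length := by decide
theorem pvQInterior : ∀ p ∈ pvPairs, ∀ i < p.1.length, 0 < i → i + 1 < p.1.length →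
    pvIsLet ((p.1[i]?).getD ' ') = true := by decide
theorem pvQuoteNotLet : pvIsLet '"' = false := by decide

-- ---- segment lemma: a pass cannot match starting strictly inside another entry's text ----

def pvHseg (q u : List Char) : Bool :=
  (List.range u.length).all fun i =>
    (!(q.isPrefixOf (u.drop i))) &&
    ((!((u.drop i).isPrefixOf q)) ||
     (decide (u.length - i < q.length) && pvIsLet (q.getD (u.length - i) ' ')))

theorem pvSeg_facts : ∀ p ∈ pvPairs, ∀ p' ∈ pvPairs,
    (p.1 ≠ p'.1 → pvHseg p.1 p'.1 = true) ∧ pvHseg p.1 p'.2 = true := by decide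

theorem pvSeg_no_match (q u X : List Char) (hseg : pvHseg q u = true)
    (hX : ∀ c, X.head? = some c → pvIsLet c = false) :
    ∀ i < u.length, ¬ q.isPrefixOf (u.drop i ++ X) := by
  intro i hi hq
  have hq' := List.isPrefixOf_iff_prefix.mp hq
  have hcl := (List.all_eq_true.mp hseg) i (List.mem_range.mpr hi)
  simp only [Bool.and_eq_true, Bool.or_eq_true, Bool.not_eq_eq_eq_not, Bool.not_true,
    decide_eq_true_eq] at hcl
  obtain ⟨hc1, hc2⟩ := hcl
  have hm : (u.drop i).length = u.length - i := by simp
  by_cases hlen : q.length ≤ u.length - i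
  · have he : q = (u.drop i).take q.length := by
      have h0 := List.prefix_iff_eq_take.mp hq'
      rwa [List.take_append_of_le_length (by omega)] at h0
    have hples : q.isPrefixOf (u.drop i) :=
      List.isPrefixOf_iff_prefix.mpr (he ▸ List.take_prefix q.length (u.drop i))
    rw [hples] at hc1
    simp at hc1
  · obtain ⟨rest, hrest⟩ := hq'
    have htake : u.drop i = q.take (u.length - i) := by
      have h2 : (q ++ rest).take (u.length - i) = (u.drop i ++ X).take (u.length - i) := by
        rw [hrest]
      rw [List.take_append_of_le_length (by omega),
          List.take_append_of_le_length (le_of_eq hm.symm)] at h2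
      have h6 : (u.drop i).take (u.length - i) = u.drop i := by
        rw [← hm, List.take_length]
      rw [h6] at h2
      exact h2.symm
    have hpre2 : (u.drop i).isPrefixOf q = true :=
      List.isPrefixOf_iff_prefix.mpr (htake ▸ List.take_prefix (u.length - i) q)
    rcases hc2 with hcon | hlet
    · rw [hpre2] at hcon
      simp at hcon
    · have hlt : u.length - i < q.length := hlet.1
      have hXeq : X = q.drop (u.length - i) ++ rest := by
        have h3 : (q ++ rest).drop (u.length - i) = (u.drop i ++ X).drop (u.length - i) := by
          rw [hrest]
        rw [List.drop_append_of_le_length (by omega)] at h3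
        have h4 : (u.drop i ++ X).drop (u.length - i) = X := by
          rw [← hm]; simp
        rw [h4] at h3
        exact h3.symm
      have hsome : q[u.length - i]? = some q[u.length - i] := List.getElem?_eq_getElem hlt
      have hne : q.drop (u.length - i) ≠ [] := by
        intro hcon
        have hc := congrArg List.length hcon
        simp at hc
        omega
      have hXhead : X.head? = some q[u.length - i] := by
        rw [hXeq]
        cases hd : q.drop (u.length - i) with
        | nil => exact absurd hd hne
        | cons a b =>
          have : (q.drop (u.length - i)).head? = q[u.length - i]? := List.head?_drop
          rw [hd] at this
          simp only [List.cons_append, List.head?_cons]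
          rw [hsome] at this
          simpa using this
      have hfalse := hX q[u.length - i] hXhead
      have hgd : q.getD (u.length - i) ' ' = q[u.length - i] := by
        simp [List.getD_eq_getElem?_getD, hsome]
      rw [hgd] at hlet
      rw [hlet.2] at hfalse
      simp at hfalse

theorem pvRepl_append_seg (q r u X : List Char)
    (H : ∀ i < u.length, ¬ q.isPrefixOf (u.drop i ++ X)) :
    pvRepl q r (u ++ X) = u ++ pvRepl q r X := by
  induction u with
  | nil => simp
  | cons c u' ih =>
    rw [List.cons_append, pvRepl]
    rw [if_neg (fun hcon => H 0 (by simp) (by simpa using hcon.1))]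
    rw [ih (fun i hi hcon => H (i + 1) (by simp; omega) (by simpa using hcon))]
    simp

theorem pvRepl_head_hit (q r X : List Char) (hq : q ≠ []) :
    pvRepl q r (q ++ X) = r ++ pvRepl q r X := by
  cases hqc : q with
  | nil => exact absurd hqc hq
  | cons a b =>
    rw [List.cons_append, pvRepl]
    rw [if_pos ?_]
    · rw [← List.cons_append, ← hqc]
      simp
    · constructor
      · rw [← List.cons_append, ← hqc]
        exact List.isPrefixOf_iff_prefix.mpr (List.prefix_append q X)
      · simp


-- ---- head of a rendered token stream ----

theorem pvFlat_head (l : List Char) (n : Nat)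
    (hl : ∀ c, l.head? = some c → pvIsLet c = false) :
    ∀ c, (pvFlat n (pvTokenize l)).head? = some c → pvIsLet c = false := by
  intro ch hch
  cases l with
  | nil =>
    rw [pvTokenize] at hch
    simp [pvFlat] at hch
  | cons c t =>
    rw [pvTokenize] at hch
    cases hf : pvFindTok pvPairs (c :: t) with
    | some qr =>
      obtain ⟨q, r⟩ := qr
      rw [hf] at hch
      have hm := pvFindTok_mem hf
      have hh := pvHeads _ hm.1
      simp only [pvFlat, List.flatMap_cons, pvRendN] at hch
      by_cases hmem : (q, r) ∈ pvPairs.take n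
      · rw [if_pos hmem] at hch
        cases hr : r with
        | nil => exact absurd hr (pvPairs_ne2 _ hm.1)
        | cons a b =>
          subst hr
          simp only [List.cons_append, List.head?_cons, Option.some.injEq] at hch
          subst hch
          simpa using hh.2
      · rw [if_neg hmem] at hch
        cases hq : q with
        | nil => exact absurd hq (pvPairs_ne _ hm.1)
        | cons a b =>
          subst hq
          simp only [List.cons_append, List.head?_cons, Option.some.injEq] at hch
          subst hch
          simpa using hh.1
    | none =>
      rw [hf] at hch
      simp only [pvFlat, List.flatMap_cons, pvRendN, List.singleton_append,
        List.head?_cons, Option.some.injEq] at hch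
      subst hch
      exact hl _ rfl

-- ---- offset of the first already-processed token ----

def pvProcOff (n : Nat) : List pvTok → Option Nat
  | [] => none
  | .raw _ :: ts => (pvProcOff n ts).map (· + 1)
  | .hit q r :: ts =>
    if (q, r) ∈ pvPairs.take n then some 0 else (pvProcOff n ts).map (· + q.length)

theorem pvProcOff_none (n : Nat) (ts : List pvTok) (h : pvProcOff n ts = none) :
    pvFlat n ts = pvFlat 0 ts := by
  induction ts with
  | nil => rfl
  | cons t ts ih =>
    cases t with
    | raw c =>
      simp only [pvProcOff, Option.map_eq_none_iff] at h
      simp only [pvFlat, List.flatMap_cons, pvRendN]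
      rw [pvFlat] at ih
      rw [ih h]
      rfl
    | hit q r =>
      simp only [pvProcOff] at h
      split at h
      · exact absurd h (by simp)
      · simp only [Option.map_eq_none_iff] at h
        simp only [pvFlat, List.flatMap_cons, pvRendN]
        rw [if_neg (by assumption), if_neg (by simp)]
        rw [pvFlat] at ih
        rw [ih h]
        rw [pvFlat]

theorem pvProcOff_spec (l : List Char) (n : Nat) :
    ∀ d, pvProcOff n (pvTokenize l) = some d →
      (pvFlat n (pvTokenize l)).take d = l.take d ∧
      (∃ p ∈ pvPairs, p.1.isPrefixOf (l.drop d)) ∧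
      ((pvFlat n (pvTokenize l)).drop d).head? = some '"' := by
  induction l using pvTokenize.induct with
  | case1 =>
    intro d hd
    rw [pvTokenize] at hd
    simp [pvProcOff] at hd
  | case2 c t q r hf ih =>
    intro d hd
    have hm := pvFindTok_mem hf
    have heq : q ++ (c :: t).drop q.length = c :: t := by
      have h0 := List.prefix_iff_eq_take.mp (List.isPrefixOf_iff_prefix.mp hm.2)
      conv_rhs => rw [← List.take_append_drop q.length (c :: t)]
      rw [← h0]
    rw [pvTokenize, hf] at hd ⊢
    simp only [pvProcOff] at hd
    by_cases hmem : (q, r) ∈ pvPairs.take n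
    · rw [if_pos hmem] at hd
      cases hd
      refine ⟨by simp, ⟨(q, r), hm.1, by simpa using hm.2⟩, ?_⟩
      simp only [pvFlat, List.flatMap_cons, pvRendN, if_pos hmem, List.drop_zero]
      cases hr : r with
      | nil => exact absurd hr (pvPairs_ne2 _ hm.1)
      | cons a b =>
        have := pvRHead _ hm.1
        rw [hr] at this
        simpa [hr] using this
    · rw [if_neg hmem] at hd
      simp only [Option.map_eq_some_iff] at hd
      obtain ⟨d', hd', hdd⟩ := hd
      obtain ⟨ih1, ⟨p', hp', hp'pre⟩, ih3⟩ := ih d' hd'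
      subst hdd
      simp only [pvFlat, List.flatMap_cons, pvRendN, if_neg hmem]
      have tkA : ∀ (M : List Char) (k : Nat), (q ++ M).take (q.length + k) = q ++ M.take k := by
        intro M k
        rw [List.take_append]
        simp
      have dpA : ∀ (M : List Char) (k : Nat), (q ++ M).drop (q.length + k) = M.drop k := by
        intro M k
        rw [List.drop_append]
        simp
      refine ⟨?_, ⟨p', hp', ?_⟩, ?_⟩
      · rw [Nat.add_comm d' q.length, tkA]
        conv_rhs => rw [← heq]
        rw [tkA]
        rw [pvFlat] at ih1
        rw [ih1]
      · rw [Nat.add_comm d' q.length]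
        conv => rw [← heq]
        rw [dpA]
        exact hp'pre
      · rw [Nat.add_comm d' q.length, dpA]
        rw [pvFlat] at ih3
        exact ih3
  | case3 c t hf ih =>
    intro d hd
    rw [pvTokenize, hf] at hd ⊢
    simp only [pvProcOff, Option.map_eq_some_iff] at hd
    obtain ⟨d', hd', hdd⟩ := hd
    obtain ⟨ih1, ⟨p', hp', hp'pre⟩, ih3⟩ := ih d' hd'
    subst hdd
    simp only [pvFlat, List.flatMap_cons, pvRendN, List.singleton_append]
    refine ⟨?_, ⟨p', hp', by simpa using hp'pre⟩, ?_⟩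
    · rw [List.take_succ_cons, List.take_succ_cons]
      rw [pvFlat] at ih1
      rw [ih1]
    · rw [List.drop_succ_cons]
      rw [pvFlat] at ih3
      exact ih3

-- ---- the precondition on the character-list side ----

def pvSafe (l : List Char) : Prop :=
  ∀ i < l.length, ∀ p ∈ pvPairs, p.1.isPrefixOf (l.drop i) →
    (i = 0 ∨ pvIsLet ((l[i-1]?).getD ' ') = false) ∧
    pvIsLet ((l[i + p.1.length]?).getD ' ') = false

theorem pvSafe_drop (l : List Char) (k : Nat) (h : pvSafe l) : pvSafe (l.drop k) := by
  intro i hi p hp hpre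
  have hi' : k + i < l.length := by
    simp at hi
    omega
  have hpre' : p.1.isPrefixOf (l.drop (k + i)) := by
    rw [← List.drop_drop]
    exact hpre
  have hki := h (k + i) hi' p hp hpre'
  constructor
  · by_cases hi0 : i = 0
    · exact Or.inl hi0
    · right
      rcases hki.1 with h0 | h0
      · omega
      · have he : (l.drop k)[i-1]? = l[k + i - 1]? := by
          rw [List.getElem?_drop]
          congr 1
          omega
        rw [he]
        exact h0
  · have he : (l.drop k)[i + p.1.length]? = l[k + i + p.1.length]? := by
      rw [List.getElem?_drop]
      congr 1
      omega
    rw [he]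
    exact hki.2

-- ---- no pass matches at an unmatched (raw) position ----

theorem pvRawcase (l : List Char) (hs : pvSafe l) (hnone : pvFindTok pvPairs l = none)
    {q r : List Char} (hqr : (q, r) ∈ pvPairs) (n : Nat) :
    ¬ q.isPrefixOf (pvFlat n (pvTokenize l)) := by
  intro hq
  cases hoff : pvProcOff n (pvTokenize l) with
  | none =>
    have hFl : pvFlat n (pvTokenize l) = l := by
      rw [pvProcOff_none n _ hoff]
      exact pvTokenize_reconstruct l
    rw [hFl] at hq
    exact pvFindTok_none hnone (q, r) hqr hq
  | some d =>
    obtain ⟨h1, ⟨p', hp', hp'pre⟩, h3⟩ := pvProcOff_spec l n d hoff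
    have hqpre := List.isPrefixOf_iff_prefix.mp hq
    by_cases hd : q.length ≤ d
    · have hql : q <+: l := by
        have e1 := List.prefix_iff_eq_take.mp hqpre
        have e2 : (pvFlat n (pvTokenize l)).take q.length
            = ((pvFlat n (pvTokenize l)).take d).take q.length := by
          rw [List.take_take, min_eq_left hd]
        rw [h1, List.take_take, min_eq_left hd] at e2
        rw [e2] at e1
        exact e1 ▸ List.take_prefix q.length l
      exact pvFindTok_none hnone (q, r) hqr (List.isPrefixOf_iff_prefix.mpr hql)
    · have hd : d < q.length := Nat.lt_of_not_le hd
      obtain ⟨rest, hrest⟩ := hqpre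
      have hq_d : (pvFlat n (pvTokenize l))[d]? = q[d]? := by
        rw [← hrest, List.getElem?_append, if_pos hd]
      have hFd : (pvFlat n (pvTokenize l))[d]? = some '"' := by
        rw [← List.head?_drop]
        exact h3
      have hd_quote : q[d]? = some '"' := by rw [← hq_d]; exact hFd
      have hlen' : d < l.length := by
        by_contra hcon
        have hcon' : l.length ≤ d := Nat.le_of_not_lt hcon
        have : l.drop d = [] := List.drop_eq_nil_of_le hcon'
        rw [this] at hp'pre
        have : p'.1 = [] := by simpa using hp'pre
        exact pvPairs_ne _ hp' this
      by_cases hd0 : d = 0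
      · subst hd0
        exact pvFindTok_none hnone p' hp' (by simpa using hp'pre)
      · have hqlen := pvQLen _ hqr
        have hdlast : d + 1 = q.length := by
          by_contra hcon
          have hint : pvIsLet ((q[d]?).getD ' ') = true :=
            pvQInterior (q, r) hqr d (by show d < q.length; omega)
              (by show 0 < d; omega) (by show d + 1 < q.length; omega)
          rw [hd_quote, Option.getD_some, pvQuoteNotLet] at hint
          simp at hint
        have hlet : pvIsLet ((q[d-1]?).getD ' ') = true := by
          have h4 : (4:Nat) ≤ q.length := by simpa using hqlen
          exact pvQInterior (q, r) hqr (d - 1) (by show d - 1 < q.length; omega)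
            (by show 0 < d - 1; omega) (by show d - 1 + 1 < q.length; omega)
        have hld : l[d-1]? = q[d-1]? := by
          have e1 : q[d-1]? = (pvFlat n (pvTokenize l))[d-1]? := by
            rw [← hrest, List.getElem?_append, if_pos (by omega : d - 1 < q.length)]
          have e2 : (pvFlat n (pvTokenize l))[d-1]? = ((pvFlat n (pvTokenize l)).take d)[d-1]? := by
            rw [List.getElem?_take_of_lt (by omega)]
          have e3 : ((pvFlat n (pvTokenize l)).take d)[d-1]? = (l.take d)[d-1]? := by rw [h1]
          rw [e1, e2, e3, List.getElem?_take_of_lt (by omega)]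
        have hsafe := hs d hlen' p' hp' hp'pre
        rcases hsafe.1 with h0 | h0
        · omega
        · rw [hld] at h0
          rw [hlet] at h0
          exact absurd h0 (by simp)


-- ---- one full pass of A over a rendered token stream advances the processed prefix ----

theorem pvPass (pre suf : List (List Char × List Char)) (p : List Char × List Char)
    (htbl : pre ++ p :: suf = pvPairs) :
    ∀ l, pvSafe l →
      pvRepl p.1 p.2 (pvFlat pre.length (pvTokenize l))
        = pvFlat (pre.length + 1) (pvTokenize l) := by
  have hpmem : p ∈ pvPairs := by rw [← htbl]; simp
  have hpnotpre : p ∉ pre := by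
    have hnd := pvNodup
    rw [← htbl, List.nodup_append] at hnd
    intro hcon
    exact hnd.2.2 p hcon p List.mem_cons_self rfl
  have htake : pvPairs.take pre.length = pre := by rw [← htbl]; simp
  have htake1 : pvPairs.take (pre.length + 1) = pre ++ [p] := by
    rw [← htbl, List.take_append]
    simp
  intro l
  induction l using pvTokenize.induct with
  | case1 =>
    intro _
    rw [pvTokenize]
    simp [pvFlat, pvRepl]
  | case2 c t q' r' hf ih =>
    intro hs
    have hm := pvFindTok_mem hf
    have hrest : pvSafe ((c :: t).drop q'.length) := pvSafe_drop _ _ hs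
    have hq'ne := pvPairs_ne _ hm.1
    rw [pvTokenize, hf]
    simp only [pvFlat, List.flatMap_cons]
    have hXhead : ∀ ch, ((pvTokenize ((c :: t).drop q'.length)).flatMap
        (pvRendN pre.length)).head? = some ch → pvIsLet ch = false := by
      have hrh : ∀ ch, ((c :: t).drop q'.length).head? = some ch → pvIsLet ch = false := by
        intro ch hch
        rw [List.head?_drop] at hch
        have hsafe0 := (hs 0 (by simp) (q', r') hm.1 (by simpa using hm.2)).2
        simp only [Nat.zero_add] at hsafe0
        rw [hch] at hsafe0
        simpa using hsafe0
      intro ch hch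
      exact pvFlat_head _ _ hrh ch (by simpa [pvFlat] using hch)
    by_cases hpq : (q', r') = p
    · obtain ⟨hq'p, hr'p⟩ : q' = p.1 ∧ r' = p.2 := by rw [← hpq]; exact ⟨rfl, rfl⟩
      subst hq'p
      subst hr'p
      have hnot : (p.1, p.2) ∉ pvPairs.take pre.length := by
        rw [htake]
        intro hcon
        exact hpnotpre (by simpa using hcon)
      rw [pvRendN, if_neg hnot]
      rw [pvRepl_head_hit _ _ _ (pvPairs_ne _ hpmem)]
      rw [pvRendN, if_pos (by rw [htake1]; simp)]
      congr 1
      simpa [pvFlat] using ih hrest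
  
    · have hq'p : q' ≠ p.1 := fun he => hpq ((pvFstInj (q', r') hm.1 p hpmem) he)
      have hseg1 : pvHseg p.1 (pvRendN pre.length (.hit q' r')) = true := by
        rw [pvRendN]
        split
        · exact (pvSeg_facts p hpmem (q', r') hm.1).2
        · exact (pvSeg_facts p hpmem (q', r') hm.1).1 (fun he => hq'p he.symm)
      rw [pvRepl_append_seg p.1 p.2 _ _
        (pvSeg_no_match p.1 _ _ hseg1 hXhead)]
      have hund : pvRendN (pre.length + 1) (pvTok.hit q' r') = pvRendN pre.length (pvTok.hit q' r') := by
        simp only [pvRendN, htake, htake1]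
        by_cases hin : (q', r') ∈ pre
        · rw [if_pos hin, if_pos (by simp [hin])]
        · rw [if_neg hin, if_neg (by simp [hin, hpq])]
      rw [hund]
      congr 1
      exact ih hrest
  | case3 c t hf ih =>
    intro hs
    have hraw := pvRawcase (c :: t) hs hf hpmem pre.length
    rw [pvTokenize, hf] at hraw ⊢
    simp only [pvFlat, List.flatMap_cons, pvRendN, List.singleton_append] at hraw ⊢
    rw [pvRepl]
    rw [if_neg (fun hcon => hraw hcon.1)]
    congr 1
    have hst : pvSafe t := by
      have := pvSafe_drop (c :: t) 1 hs
      simpa using this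
    exact ih hst

-- ---- chaining all 26 passes ----

theorem pvChain : ∀ (suf pre : List (List Char × List Char)), pre ++ suf = pvPairs →
    ∀ l, pvSafe l →
      suf.foldl (fun s p => pvRepl p.1 p.2 s) (pvFlat pre.length (pvTokenize l))
        = pvFlat pvPairs.length (pvTokenize l) := by
  intro suf
  induction suf with
  | nil =>
    intro pre htbl l _
    simp only [List.foldl_nil]
    have : pre.length = pvPairs.length := by rw [← htbl]; simp
    rw [this]
  | cons p suf' ih =>
    intro pre htbl l hs
    simp only [List.foldl_cons]
    rw [pvPass pre suf' p htbl l hs]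
    have hlen : pre.length + 1 = (pre ++ [p]).length := by simp
    rw [hlen]
    exact ih (pre ++ [p]) (by rw [← htbl]; simp) l hs

-- ---- A's String fold, moved to the character-list side ----

theorem pvFoldA (ks : List (String × String)) :
    ∀ (s : String),
      (ks.foldl (fun s kv =>
        let s1 := PySem.Str.replace s ("\"" ++ kv.1 ++ "\"") kv.2
        PySem.Str.replace s1 ("'" ++ kv.1 ++ "'") kv.2) s).toList
      = (ks.flatMap (fun kv =>
          [(("\"" ++ kv.1 ++ "\"").toList, kv.2.toList),
           (("'" ++ kv.1 ++ "'").toList, kv.2.toList)])).foldl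
          (fun l p => PySem.Chars.replace l p.1 p.2) s.toList := by
  induction ks with
  | nil => intro s; rfl
  | cons kv ks ih =>
    intro s
    simp only [List.foldl_cons, List.flatMap_cons, List.cons_append]
    rw [ih]
    congr 1
    simp [PySem.Str.toList_replace]

theorem pvA_toList (content : String) :
    (obfuscate_strings_py content).toList
      = pvPairs.foldl (fun l p => PySem.Chars.replace l p.1 p.2) content.toList := by
  unfold obfuscate_strings_py
  rw [pvFoldA]
  rfl

theorem pvFold_repl (tb : List (List Char × List Char)) (hne : ∀ p ∈ tb, p.1 ≠ []) :
    ∀ l, tb.foldl (fun l p => PySem.Chars.replace l p.1 p.2) l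
        = tb.foldl (fun s p => pvRepl p.1 p.2 s) l := by
  induction tb with
  | nil => intro _; rfl
  | cons p tb ih =>
    intro l
    simp only [List.foldl_cons]
    rw [pvReplace_eq _ _ _ (hne p (by simp))]
    exact ih (fun p hp => hne p (by simp [hp])) _

-- ---- B's scanner equals the rendered token stream ----

theorem pvTableB_map : pvTableB.map (fun p => (p.1.toList, p.2.toList)) = pvPairs := by decide

theorem pvScanFind_eq (tb : List (String × String)) :
    ∀ l, pvScanFind tb l
      = (pvFindTok (tb.map (fun p => (p.1.toList, p.2.toList))) l).map
          (fun p => (p.2, p.1.length)) := by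
  induction tb with
  | nil => intro l; rfl
  | cons p tb ih =>
    intro l
    obtain ⟨ps, rs⟩ := p
    simp only [pvScanFind, List.map_cons, pvFindTok]
    by_cases hp : ps.toList.isPrefixOf l
    · have hsw : PySem.Chars.startswith l ps.toList = true :=
        (PySem.Chars.startswith_iff l ps.toList).mpr (List.isPrefixOf_iff_prefix.mp hp)
      rw [if_pos hsw, if_pos hp]
      rfl
    · have hsw : ¬ (PySem.Chars.startswith l ps.toList = true) := fun hcon =>
        hp (List.isPrefixOf_iff_prefix.mpr ((PySem.Chars.startswith_iff l ps.toList).mp hcon))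
      rw [if_neg hsw, if_neg hp]
      exact ih l

theorem pvScanGo_eq : ∀ (fuel : Nat) (l : List Char), l.length ≤ fuel →
    pvScanGo pvTableB fuel l = pvFlat pvPairs.length (pvTokenize l) := by
  intro fuel
  induction fuel with
  | zero =>
    intro l hl
    have : l = [] := List.length_eq_zero_iff.mp (Nat.le_zero.mp hl)
    subst this
    rw [pvTokenize]
    rfl
  | succ f ih =>
    intro l hl
    cases l with
    | nil => rw [pvTokenize]; rfl
    | cons c t =>
      rw [pvScanGo, pvScanFind_eq, pvTableB_map]
      cases hf : pvFindTok pvPairs (c :: t) with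
      | some qr =>
        obtain ⟨q, r⟩ := qr
        have hm := pvFindTok_mem hf
        simp only [Option.map_some]
        rw [pvTokenize, hf]
        simp only [pvFlat, List.flatMap_cons, pvRendN]
        rw [if_pos (by rw [List.take_length]; exact hm.1)]
        congr 1
        apply ih
        have h1 : 1 ≤ q.length := by
          cases hq : q with
          | nil => exact absurd hq (pvPairs_ne _ hm.1)
          | cons a b => simp
        simp at hl ⊢
        omega
      | none =>
        simp only [Option.map_none]
        rw [pvTokenize, hf]
        simp only [pvFlat, List.flatMap_cons, pvRendN, List.singleton_append]
        congr 1
        apply ih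
        simp at hl
        omega

-- ===== VERDICT (by name: the statement is the Claim_ definition above) =====
theorem obfuscate_strings_py_spec : Claim_equal_obfuscate_strings_py := by
  unfold Claim_equal_obfuscate_strings_py
  intro content _ hpre
  unfold Spec_obfuscate_strings_py
  have hsafe : pvSafe content.toList := hpre
  have hA : (obfuscate_strings_py content).toList
      = pvFlat pvPairs.length (pvTokenize content.toList) := by
    rw [pvA_toList, pvFold_repl pvPairs pvPairs_ne]
    have h0 : content.toList = pvFlat 0 (pvTokenize content.toList) :=
      (pvTokenize_reconstruct _).symm
    conv_lhs => rw [h0]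
    exact pvChain pvPairs [] rfl content.toList hsafe
  have hB : (obfuscate_strings_py_alt content).toList
      = pvFlat pvPairs.length (pvTokenize content.toList) := by
    unfold obfuscate_strings_py_alt
    simp only [String.toList_ofList]
    exact pvScanGo_eq content.toList.length content.toList le_rfl
  have hAB := hA.trans hB.symm
  calc obfuscate_strings_py content
      = String.ofList (obfuscate_strings_py content).toList := by simp
    _ = String.ofList (obfuscate_strings_py_alt content).toList := by rw [hAB]
    _ = obfuscate_strings_py_alt content := by simp
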